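-- pv_equiv track=rewrite | github.com/AleYepes/pystocks | functions.py | process_dividends
-- ===== SOURCE A (Python) =====
-- def process_dividends(text_list):
--     labels, values, value_indicator = [], [], False
--
--     for item in text_list:
--         if item[-1] == '%':
--             value_indicator = True
--         if value_indicator:
--             values.append(item)
--         else:
--             labels.append(item)
--
--     return list(zip(labels, values))
-- ===== SOURCE B (Python) =====
-- def process_dividends(text_list):
--     split = len(text_list)
--     for i, item in enumerate(text_list):
--         if item[-1] == '%':
--             split = i
--             break
--     return list(zip(text_list[:split], text_list[split:]))
-- ===== Notes on version B (the rewrite author's own statement) =====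
-- stated objective: simpler
-- what changed: Replaces the three-accumulator flag loop with a boundary search (index of the first item ending in '%') followed by zipping the two slices around it.
import Mathlib
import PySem

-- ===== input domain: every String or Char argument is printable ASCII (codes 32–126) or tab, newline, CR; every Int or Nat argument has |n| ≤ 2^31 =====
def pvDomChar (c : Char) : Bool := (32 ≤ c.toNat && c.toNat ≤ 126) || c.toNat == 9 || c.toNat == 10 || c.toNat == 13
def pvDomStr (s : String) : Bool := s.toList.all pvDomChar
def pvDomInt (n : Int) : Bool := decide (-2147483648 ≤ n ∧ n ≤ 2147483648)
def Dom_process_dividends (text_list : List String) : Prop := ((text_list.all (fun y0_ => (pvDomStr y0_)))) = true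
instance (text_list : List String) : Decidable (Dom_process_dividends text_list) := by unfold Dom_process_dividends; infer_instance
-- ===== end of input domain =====

-- B replaces A's three-accumulator flag loop by "find the boundary index, zip the two slices" (objective: simpler).


-- ===== PORT A =====
-- state = (labels, values, value_indicator); item[-1] ported exactly as PySem.Str.pyGet? item (-1)
def process_dividends (text_list : List String) : List (String × String) :=
  let st := text_list.foldl
    (fun (st : List String × List String × Bool) item =>
      let ind := if PySem.Str.pyGet? item (-1) == some '%' then true else st.2.2
      if ind then (st.1, st.2.1 ++ [item], ind) else (st.1 ++ [item], st.2.1, ind))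
    ([], [], false)
  List.zip st.1 st.2.1

-- ===== PORT B =====
-- index of the first item whose last character is '%' (length of the list if none)
def pvSplit (ts : List String) : Nat :=
  match ts with
  | [] => 0
  | s :: rest => if PySem.Str.pyGet? s (-1) == some '%' then 0 else 1 + pvSplit rest

def process_dividends_alt (text_list : List String) : List (String × String) :=
  let split := pvSplit text_list
  List.zip (text_list.take split) (text_list.drop split)

-- ===== PRECONDITION & SPEC =====
-- Pre_ excludes lists containing an empty string: there the Python A raises IndexError on item[-1].
def Pre_process_dividends (text_list : List String) : Prop := "" ∉ text_list
instance (text_list : List String) : Decidable (Pre_process_dividends text_list) := by unfold Pre_process_dividends; infer_instance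
def pvWitness_process_dividends : List String := ["Dividend", "Yield", "5.2%", "1.3%"]

def Spec_process_dividends (text_list : List String) (out : List (String × String)) : Prop := out = process_dividends_alt text_list
instance (text_list : List String) (out : List (String × String)) : Decidable (Spec_process_dividends text_list out) := by unfold Spec_process_dividends; infer_instance

-- ===== CLAIM (what is proved, stated in full; the proofs are below) =====
def Claim_equal_process_dividends : Prop := ∀ (text_list : List String), Dom_process_dividends text_list → Pre_process_dividends text_list → Spec_process_dividends text_list (process_dividends text_list)

-- ===== LEMMAS AND PROOFS =====

-- A's loop body, named for the lemmas
def pvStep (st : List String × List String × Bool) (item : String) : List String × List String × Bool :=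
  let ind := if PySem.Str.pyGet? item (-1) == some '%' then true else st.2.2
  if ind then (st.1, st.2.1 ++ [item], ind) else (st.1 ++ [item], st.2.1, ind)

-- once the indicator is true, everything is appended to values
theorem pvFold_true (ts : List String) (ls vs : List String) :
    ts.foldl pvStep (ls, vs, true) = (ls, vs ++ ts, true) := by
  induction ts generalizing vs with
  | nil => simp
  | cons s rest ih => simp [pvStep, ih]

-- with the indicator false, the fold splits at pvSplit
theorem pvFold_false (ts : List String) (ls vs : List String) :
    (ts.foldl pvStep (ls, vs, false)).1 = ls ++ ts.take (pvSplit ts) ∧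
    (ts.foldl pvStep (ls, vs, false)).2.1 = vs ++ ts.drop (pvSplit ts) := by
  induction ts generalizing ls vs with
  | nil => simp
  | cons s rest ih =>
    by_cases h : PySem.List.pyGet? s.toList (-1) = some '%'
    · simp [pvSplit, pvStep, PySem.Str.pyGet?, h, pvFold_true]
    · have := ih (ls ++ [s]) vs
      simpa [pvSplit, pvStep, PySem.Str.pyGet?, h, Nat.add_comm 1] using this

-- ===== VERDICT (by name: the statement is the Claim_ definition above) =====
theorem process_dividends_spec : Claim_equal_process_dividends := by
  intro ts _ _
  unfold Spec_process_dividends process_dividends process_dividends_alt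
  have h := pvFold_false ts [] []
  show List.zip (ts.foldl pvStep ([], [], false)).1 (ts.foldl pvStep ([], [], false)).2.1 = _
  rw [h.1, h.2]
  simp
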